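-- pv_equiv track=rewrite | github.com/rockmizx/grandchase_toolkit | decompiler/ljd_decompiler/ljd/lua/postprocess.py | _remove_empty_if_else
-- ===== SOURCE A (Python) =====
-- def _remove_empty_if_else(lines):
--     """Remove empty else blocks: 'else' immediately followed by 'end'."""
--     result = []
--     i = 0
--     while i < len(lines):
--         # Check for pattern: else\n<blank>\nend or else\nend
--         if i < len(lines) - 1:
--             cur = lines[i].strip()
--             j = i + 1
--             # Skip blank lines between else and end
--             while j < len(lines) and lines[j].strip() == '':
--                 j += 1
--             if cur == 'else' and j < len(lines) and lines[j].strip() == 'end':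
--                 # Replace 'else' + possible blanks + 'end' with just 'end'
--                 indent = len(lines[i]) - len(lines[i].lstrip())
--                 result.append(lines[i][:indent] + 'end')
--                 i = j + 1
--                 continue
--         result.append(lines[i])
--         i += 1
--     return result
-- ===== SOURCE B (Python) =====
-- def _remove_empty_if_else(lines):
--     """Remove empty else blocks in ONE pass: buffer an 'else' (plus following
--     blank lines) and collapse it with the next 'end'; no rescans."""
--     out = []
--     pending = None  # (else_line, [buffered blank lines]) or None
--     for line in lines:
--         s = line.strip()
--         if pending is not None:
--             if s == '':
--                 pending[1].append(line)
--                 continue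
--             if s == 'end':
--                 e = pending[0]
--                 out.append(e[:len(e) - len(e.lstrip())] + 'end')
--                 pending = None
--                 continue
--             out.append(pending[0])
--             out.extend(pending[1])
--             pending = None
--         if s == 'else':
--             pending = (line, [])
--         else:
--             out.append(line)
--     if pending is not None:
--         out.append(pending[0])
--         out.extend(pending[1])
--     return out
-- ===== Notes on version B (the rewrite author's own statement) =====
-- stated objective: faster
-- what changed: A rescans the run of blank lines after EVERY index (O(n^2) on blank-heavy input); B makes one pass with a small buffer that holds a pending 'else' plus following blanks and collapses it when an 'end' arrives, so no line is read twice.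
import Mathlib
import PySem

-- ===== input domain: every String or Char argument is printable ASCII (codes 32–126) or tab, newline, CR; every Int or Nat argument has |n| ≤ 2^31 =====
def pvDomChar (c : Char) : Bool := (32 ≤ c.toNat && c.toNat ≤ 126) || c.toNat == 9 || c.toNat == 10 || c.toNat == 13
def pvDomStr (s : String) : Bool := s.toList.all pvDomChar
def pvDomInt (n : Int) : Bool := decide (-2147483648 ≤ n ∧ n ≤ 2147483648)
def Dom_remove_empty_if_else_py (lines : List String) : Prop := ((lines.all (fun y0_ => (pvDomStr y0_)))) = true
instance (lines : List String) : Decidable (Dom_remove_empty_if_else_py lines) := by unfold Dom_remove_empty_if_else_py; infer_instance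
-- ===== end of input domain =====

-- B replaces A's rescan-blanks-at-every-index while loop by a one-pass buffer
-- (an 'else' plus following blanks wait to see whether an 'end' comes): objective faster.

-- ===== PORT A =====
-- lines[i][:indent] + 'end'  with  indent = len(lines[i]) - len(lines[i].lstrip())
-- (this exact expression occurs verbatim in both Pythons, so it is a shared helper)
def pvIndentEnd (line : String) : String :=
  PySem.Str.slice line none
    (some ((PySem.Str.len line : Int) - (PySem.Str.len (PySem.Str.lstrip line) : Int))) ++ "end"

-- inner 'while j < len(lines) and lines[j].strip() == "": j += 1'
def pvSkipBlanks (lines : List String) (j : Nat) : Nat :=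
  if _h : j < lines.length ∧ PySem.Str.strip (lines.getD j "") = "" then
    pvSkipBlanks lines (j + 1)
  else j
termination_by lines.length - j
decreasing_by omega

theorem pvSkipBlanks_ge (lines : List String) (j : Nat) : j ≤ pvSkipBlanks lines j := by
  unfold pvSkipBlanks
  split
  · have := pvSkipBlanks_ge lines (j + 1); omega
  · exact le_refl j
termination_by lines.length - j
decreasing_by omega

-- outer 'while i < len(lines)' of A, literally (i jumps to j+1 on a match)
def pvGoA (lines : List String) (i : Nat) : List String :=
  if h : i < lines.length then
    if i + 1 < lines.length then  -- 'if i < len(lines) - 1'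
      let cur := PySem.Str.strip (lines.getD i "")
      let j := pvSkipBlanks lines (i + 1)
      if cur = "else" ∧ j < lines.length ∧ PySem.Str.strip (lines.getD j "") = "end" then
        pvIndentEnd (lines.getD i "") :: pvGoA lines (j + 1)
      else
        lines.getD i "" :: pvGoA lines (i + 1)
    else
      lines.getD i "" :: pvGoA lines (i + 1)
  else []
termination_by lines.length - i
decreasing_by
  · have := pvSkipBlanks_ge lines (i + 1); omega
  · omega
  · omega

def remove_empty_if_else_py (lines : List String) : List String := pvGoA lines 0

-- ===== PORT B =====
-- one step of B's for-loop; state = (out, pending)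
def pvStepB (st : List String × Option (String × List String)) (line : String) :
    List String × Option (String × List String) :=
  let s := PySem.Str.strip line
  match st with
  | (out, some (e, bs)) =>
    if s = "" then (out, some (e, bs ++ [line]))
    else if s = "end" then (out ++ [pvIndentEnd e], none)
    else
      let out' := out ++ [e] ++ bs
      if s = "else" then (out', some (line, []))
      else (out' ++ [line], none)
  | (out, none) =>
    if s = "else" then (out, some (line, []))
    else (out ++ [line], none)

def remove_empty_if_else_py_alt (lines : List String) : List String :=
  let st := lines.foldl pvStepB ([], none)
  match st.2 with
  | some (e, bs) => st.1 ++ [e] ++ bs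
  | none => st.1

-- ===== PRECONDITION & SPEC =====
def Spec_remove_empty_if_else_py (lines : List String) (out : List String) : Prop := out = remove_empty_if_else_py_alt lines
instance (lines : List String) (out : List String) : Decidable (Spec_remove_empty_if_else_py lines out) := by unfold Spec_remove_empty_if_else_py; infer_instance

-- ===== CLAIM (what is proved, stated in full; the proofs are below) =====
def Claim_equal_remove_empty_if_else_py : Prop := ∀ (lines : List String), Dom_remove_empty_if_else_py lines → Spec_remove_empty_if_else_py lines (remove_empty_if_else_py lines)

-- ===== LEMMAS AND PROOFS =====

-- blank-line test, as a Bool predicate for dropWhile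
def pvBlank (x : String) : Bool := PySem.Str.strip x = ""

-- common reference function: structural recursion on the list of lines
def pvSpec : List String → List String
  | [] => []
  | l :: rest =>
    let r := rest.dropWhile pvBlank
    if PySem.Str.strip l = "else" ∧ r.head?.map PySem.Str.strip = some "end" then
      pvIndentEnd l :: pvSpec r.tail
    else
      l :: pvSpec rest
termination_by xs => xs.length
decreasing_by
  · have h1 : (rest.dropWhile pvBlank).length ≤ rest.length := List.length_dropWhile_le ..
    have h2 : (rest.dropWhile pvBlank).tail.length ≤ (rest.dropWhile pvBlank).length :=
      (rest.dropWhile pvBlank).tail_sublist.length_le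
    simp only [List.length_cons]; omega
  · simp only [List.length_cons]; omega

theorem pvSkipBlanks_drop (lines : List String) (j : Nat) :
    lines.drop (pvSkipBlanks lines j) = (lines.drop j).dropWhile pvBlank := by
  unfold pvSkipBlanks
  split
  · rename_i h
    obtain ⟨hj, hb⟩ := h
    rw [List.drop_eq_getElem_cons hj]
    have hb' : PySem.Str.strip lines[j] = "" := (List.getD_eq_getElem lines "" hj) ▸ hb
    rw [List.dropWhile_cons_of_pos (by simp [pvBlank, hb'])]
    exact pvSkipBlanks_drop lines (j + 1)
  · rename_i h
    by_cases hj : j < lines.length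
    · have hb : ¬ PySem.Str.strip (lines.getD j "") = "" := fun hb => h ⟨hj, hb⟩
      rw [List.drop_eq_getElem_cons hj]
      have hb' : ¬ PySem.Str.strip lines[j] = "" := (List.getD_eq_getElem lines "" hj) ▸ hb
      rw [List.dropWhile_cons_of_neg (by simp [pvBlank, hb'])]
    · rw [List.drop_eq_nil_of_le (by omega)]
      simp
termination_by lines.length - j
decreasing_by omega

-- A computes pvSpec of the remaining suffix
theorem pvGoA_eq_pvSpec (lines : List String) :
    ∀ n i, lines.length - i ≤ n → pvGoA lines i = pvSpec (lines.drop i) := by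
  intro n
  induction n with
  | zero =>
    intro i hn
    have hge : lines.length ≤ i := by omega
    rw [List.drop_eq_nil_of_le hge]
    unfold pvGoA
    rw [dif_neg (by omega)]
    simp [pvSpec]
  | succ n ih =>
    intro i hn
    by_cases hi : i < lines.length
    · have hdropi : lines.drop i = lines.getD i "" :: lines.drop (i + 1) := by
        rw [List.drop_eq_getElem_cons hi, List.getD_eq_getElem lines "" hi]
      set x := lines.getD i "" with hx
      set j := pvSkipBlanks lines (i + 1) with hjdef
      have hjge : i + 1 ≤ j := pvSkipBlanks_ge lines (i + 1)
      have hdropj : lines.drop j = (lines.drop (i + 1)).dropWhile pvBlank :=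
        pvSkipBlanks_drop lines (i + 1)
      have hcond : (PySem.Str.strip x = "else" ∧ j < lines.length ∧
            PySem.Str.strip (lines.getD j "") = "end")
          ↔ (PySem.Str.strip x = "else" ∧
              ((lines.drop (i+1)).dropWhile pvBlank).head?.map PySem.Str.strip = some "end") := by
        rw [← hdropj]
        constructor
        · rintro ⟨he, hj, hend⟩
          have hend' : PySem.Str.strip lines[j] = "end" := (List.getD_eq_getElem lines "" hj) ▸ hend
          refine ⟨he, ?_⟩
          rw [List.drop_eq_getElem_cons hj]
          simp only [List.head?_cons, Option.map_some]
          exact congrArg some hend'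
        · rintro ⟨he, hm⟩
          by_cases hj : j < lines.length
          · rw [List.drop_eq_getElem_cons hj] at hm
            simp only [List.head?_cons, Option.map_some, Option.some.injEq] at hm
            exact ⟨he, hj, (List.getD_eq_getElem lines "" hj).symm ▸ hm⟩
          · rw [List.drop_eq_nil_of_le (by omega)] at hm
            simp at hm
      -- unfold pvSpec on the cons
      rw [hdropi]
      rw [pvSpec]
      unfold pvGoA
      rw [dif_pos hi]
      by_cases hi1 : i + 1 < lines.length
      · rw [if_pos hi1]
        by_cases hc : PySem.Str.strip x = "else" ∧ j < lines.length ∧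
            PySem.Str.strip (lines.getD j "") = "end"
        · rw [if_pos hc, if_pos (hcond.mp hc)]
          have htail : ((lines.drop (i+1)).dropWhile pvBlank).tail = lines.drop (j + 1) := by
            rw [← hdropj]
            obtain ⟨_, hj, _⟩ := hc
            rw [List.drop_eq_getElem_cons hj]
            rfl
          rw [htail]
          have : lines.length - (j + 1) ≤ n := by omega
          rw [ih (j + 1) this]
        · rw [if_neg hc, if_neg (fun h => hc (hcond.mpr h))]
          rw [ih (i + 1) (by omega)]
      · rw [if_neg hi1]
        have hd1 : lines.drop (i + 1) = [] := List.drop_eq_nil_of_le (by omega)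
        have hfalse : ¬ (PySem.Str.strip x = "else" ∧
            ((lines.drop (i+1)).dropWhile pvBlank).head?.map PySem.Str.strip = some "end") := by
          rw [hd1]; simp
        rw [if_neg hfalse, ih (i + 1) (by omega)]
    · rw [List.drop_eq_nil_of_le (by omega)]
      unfold pvGoA
      rw [dif_neg hi]
      simp [pvSpec]

-- pvSpec walks over all-blank prefixes
theorem pvSpec_blank_append (bs xs : List String) (hb : ∀ b ∈ bs, pvBlank b) :
    pvSpec (bs ++ xs) = bs ++ pvSpec xs := by
  induction bs with
  | nil => simp
  | cons b bs ih =>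
    have hbb : pvBlank b := hb b (by simp)
    have hbs : PySem.Str.strip b = "" := by simpa [pvBlank] using hbb
    rw [List.cons_append, pvSpec]
    rw [if_neg (by simp [hbs])]
    rw [ih (fun x hx => hb x (by simp [hx]))]
    simp

-- B's fold, related to pvSpec: combined invariant for both pending states
theorem pvFoldB_inv (xs : List String) :
    (∀ out, (match (List.foldl pvStepB (out, none) xs).2 with
        | some (e, bs) => (List.foldl pvStepB (out, none) xs).1 ++ [e] ++ bs
        | none => (List.foldl pvStepB (out, none) xs).1) = out ++ pvSpec xs) ∧
    (∀ out e bs, PySem.Str.strip e = "else" → (∀ b ∈ bs, pvBlank b) →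
      (match (List.foldl pvStepB (out, some (e, bs)) xs).2 with
        | some (e', bs') => (List.foldl pvStepB (out, some (e, bs)) xs).1 ++ [e'] ++ bs'
        | none => (List.foldl pvStepB (out, some (e, bs)) xs).1) = out ++ pvSpec (e :: (bs ++ xs))) := by
  induction xs with
  | nil =>
    constructor
    · intro out; simp [pvSpec]
    · intro out e bs he hbs
      simp only [List.foldl_nil]
      have hr : bs.dropWhile pvBlank = [] := List.dropWhile_eq_nil_iff.mpr (fun x hx => hbs x hx)
      rw [List.append_nil, pvSpec, hr]
      rw [if_neg (by simp)]
      have hbsid : pvSpec bs = bs := by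
        have := pvSpec_blank_append bs [] hbs
        simpa [pvSpec] using this
      simp [hbsid]
  | cons x xs ih =>
    have hnone : ∀ out, pvStepB (out, none) x =
        (if PySem.Str.strip x = "else" then (out, some (x, [])) else (out ++ [x], none)) := by
      intro out; rfl
    constructor
    · intro out
      rw [List.foldl_cons, hnone]
      by_cases hx : PySem.Str.strip x = "else"
      · rw [if_pos hx]
        rw [ih.2 out x [] hx (by simp)]
        simp
      · rw [if_neg hx]
        rw [ih.1 (out ++ [x])]
        rw [pvSpec]
        rw [if_neg (by simp [hx])]
        simp
    · intro out e bs he hbs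
      rw [List.foldl_cons]
      by_cases hb : PySem.Str.strip x = ""
      · have : pvStepB (out, some (e, bs)) x = (out, some (e, bs ++ [x])) := by
          simp [pvStepB, hb]
        rw [this]
        rw [ih.2 out e (bs ++ [x]) he
          (by intro b hbmem
              rcases List.mem_append.mp hbmem with h | h
              · exact hbs b h
              · simp only [List.mem_singleton] at h; subst h; simp [pvBlank, hb])]
        simp
      · have hnilbs : bs.dropWhile pvBlank = [] := List.dropWhile_eq_nil_iff.mpr (fun b h => hbs b h)
        have hdw : (bs ++ x :: xs).dropWhile pvBlank = x :: xs := by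
          rw [List.dropWhile_append, hnilbs]
          simp only [List.isEmpty_nil, if_true]
          exact List.dropWhile_cons_of_neg (by simp [pvBlank, hb])
        by_cases hend : PySem.Str.strip x = "end"
        · have : pvStepB (out, some (e, bs)) x = (out ++ [pvIndentEnd e], none) := by
            simp [pvStepB, hend]
          rw [this, ih.1 (out ++ [pvIndentEnd e])]
          rw [pvSpec, hdw]
          rw [if_pos (by exact ⟨he, by simp [hend]⟩)]
          simp
        · have hspec : pvSpec (e :: (bs ++ x :: xs)) = e :: (bs ++ pvSpec (x :: xs)) := by
            rw [pvSpec, hdw]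
            rw [if_neg (by simp [hend])]
            rw [pvSpec_blank_append bs (x :: xs) hbs]
          by_cases hx : PySem.Str.strip x = "else"
          · have : pvStepB (out, some (e, bs)) x = (out ++ [e] ++ bs, some (x, [])) := by
              simp [pvStepB, hb, hend, hx]
            rw [this, ih.2 (out ++ [e] ++ bs) x [] hx (by simp)]
            rw [hspec]
            simp
          · have : pvStepB (out, some (e, bs)) x = (out ++ [e] ++ bs ++ [x], none) := by
              simp [pvStepB, hb, hend, hx]
            rw [this, ih.1 (out ++ [e] ++ bs ++ [x])]
            rw [hspec, pvSpec]
            rw [if_neg (by simp [hx])]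
            simp
  
theorem alt_eq_pvSpec (lines : List String) : remove_empty_if_else_py_alt lines = pvSpec lines := by
  have h := (pvFoldB_inv lines).1 []
  simpa [remove_empty_if_else_py_alt] using h

-- ===== VERDICT (by name: the statement is the Claim_ definition above) =====
theorem remove_empty_if_else_py_spec : Claim_equal_remove_empty_if_else_py := by
  intro lines _
  unfold Spec_remove_empty_if_else_py
  rw [alt_eq_pvSpec]
  have := pvGoA_eq_pvSpec lines lines.length 0 (by omega)
  simpa [remove_empty_if_else_py] using this
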